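-- pv_equiv track=rewrite | github.com/Daksh3008/forecast_updated | forecaster/utils/send_email.py | _wrap_long_tokens
-- ===== SOURCE A (Python) =====
-- def _wrap_long_tokens(text: str, max_len: int = 100) -> str:
--     """
--     Hard-wrap very long unbroken strings.
--     """
--     out = []
--     for line in text.split("\n"):
--         while len(line) > max_len:
--             out.append(line[:max_len])
--             line = line[max_len:]
--         out.append(line)
--     return "\n".join(out)
-- ===== SOURCE B (Python) =====
-- def _wrap_long_tokens(text: str, max_len: int = 100) -> str:
--     """
--     Hard-wrap very long unbroken strings (single pass: one chunk per slice index).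
--     """
--     return "\n".join(
--         line[i:i + max_len]
--         for line in text.split("\n")
--         for i in range(0, max(len(line), 1), max_len)
--     )
-- ===== Notes on version B (the rewrite author's own statement) =====
-- stated objective: simpler
-- what changed: Replaces A's destructive while-loop that repeatedly reslices each line with a single comprehension that maps precomputed chunk start indices (range(0, max(len(line),1), max_len)) to slices, joined in one pass.
-- outside the precondition, e.g. on _wrap_long_tokens('', 0): A returns '', B raises ValueError; on _wrap_long_tokens('\n', 0): A returns '\n', B raises ValueError
import Mathlib
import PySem

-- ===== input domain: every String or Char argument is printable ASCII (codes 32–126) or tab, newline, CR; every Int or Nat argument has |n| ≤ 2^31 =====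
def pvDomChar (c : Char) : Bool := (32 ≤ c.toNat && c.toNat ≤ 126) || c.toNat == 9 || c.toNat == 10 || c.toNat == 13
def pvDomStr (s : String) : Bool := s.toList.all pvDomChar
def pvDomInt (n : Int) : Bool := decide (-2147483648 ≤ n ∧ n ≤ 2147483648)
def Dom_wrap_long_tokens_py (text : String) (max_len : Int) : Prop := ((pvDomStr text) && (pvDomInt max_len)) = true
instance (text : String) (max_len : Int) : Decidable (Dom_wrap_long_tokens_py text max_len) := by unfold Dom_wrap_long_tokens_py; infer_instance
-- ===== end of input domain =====

-- B replaces A's destructive while-loop (repeatedly re-slicing each line) by a single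
-- comprehension mapping precomputed chunk start indices to slices; objective: simpler.


-- ===== PORT A =====
-- the 'while len(line) > max_len: out.append(line[:max_len]); line = line[max_len:]' loop;
-- fuel = initial line length suffices when max_len ≥ 1 (for max_len ≤ 0 Python loops
-- forever on any line it has to wrap; such inputs are outside Pre_)
def pvWhileA (fuel : Nat) (line : List Char) (max_len : Int) (out : List (List Char)) : List (List Char) :=
  match fuel with
  | 0 => out ++ [line]
  | f + 1 =>
    if (line.length : Int) > max_len then
      pvWhileA f (PySem.List.slice line (some max_len) none) max_len
        (out ++ [PySem.List.slice line none (some max_len)])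
    else out ++ [line]

def wrap_long_tokens_py (text : String) (max_len : Int) : String :=
  String.ofList (PySem.Chars.join ['\n']
    ((PySem.Chars.splitOn text.toList ['\n']).foldl
      (fun out line => pvWhileA line.length line max_len out) []))

-- ===== PORT B =====
def wrap_long_tokens_py_alt (text : String) (max_len : Int) : String :=
  String.ofList (PySem.Chars.join ['\n']
    ((PySem.Chars.splitOn text.toList ['\n']).flatMap (fun line =>
      (PySem.List.pyRange 0 (max (line.length : Int) 1) max_len).map (fun i =>
        PySem.List.slice line (some i) (some (i + max_len))))))

-- ===== PRECONDITION & SPEC =====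
-- Pre_ requires max_len ≥ 1: for max_len ≤ 0 Python's A loops forever on any line it has
-- to wrap (for max_len < 0 even on an empty line); on the only returning cases left out
-- (max_len = 0 with text consisting solely of newlines, where A returns text unchanged)
-- B raises ValueError from range() with step 0.
def Pre_wrap_long_tokens_py (text : String) (max_len : Int) : Prop := 1 ≤ max_len
instance (text : String) (max_len : Int) : Decidable (Pre_wrap_long_tokens_py text max_len) := by unfold Pre_wrap_long_tokens_py; infer_instance
def pvWitness_wrap_long_tokens_py : String × Int := ("abcdef\nxy", 4)

def Spec_wrap_long_tokens_py (text : String) (max_len : Int) (out : String) : Prop := out = wrap_long_tokens_py_alt text max_len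
instance (text : String) (max_len : Int) (out : String) : Decidable (Spec_wrap_long_tokens_py text max_len out) := by unfold Spec_wrap_long_tokens_py; infer_instance

-- ===== CLAIM (what is proved, stated in full; the proofs are below) =====
def Claim_equal_wrap_long_tokens_py : Prop := ∀ (text : String) (max_len : Int), Dom_wrap_long_tokens_py text max_len → Pre_wrap_long_tokens_py text max_len → Spec_wrap_long_tokens_py text max_len (wrap_long_tokens_py text max_len)

-- ===== LEMMAS AND PROOFS =====

-- a positive-step range is empty once start ≥ stop
lemma pyRange_pos_nil (a b s : Int) (hs : 0 < s) (hab : b ≤ a) :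
    PySem.List.pyRange a b s = [] := by
  rw [PySem.List.pyRange_of_pos a b hs]
  simp [show ¬ a < b by omega]

-- a positive-step range unfolds by one step while start < stop
lemma pyRange_pos_cons (a b s : Int) (hs : 0 < s) (hab : a < b) :
    PySem.List.pyRange a b s = a :: PySem.List.pyRange (a + s) b s := by
  rw [PySem.List.pyRange_of_pos a b hs, PySem.List.pyRange_of_pos (a+s) b hs]
  have hd : (b - a + s - 1) / s = (b - a - 1) / s + 1 := by
    have : b - a + s - 1 = (b - a - 1) + 1 * s := by ring
    rw [this, Int.add_mul_ediv_right _ _ (by omega : s ≠ 0)]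
  have hnn : 0 ≤ (b - a - 1) / s := Int.ediv_nonneg (by omega) (by omega)
  have hcount : (if a + s < b then ((b - (a+s) + s - 1) / s).toNat else 0) = ((b - a - 1)/s).toNat := by
    by_cases h : a + s < b
    · simp [h]; congr 1; ring_nf
    · have h1 : b - a - 1 < s := by omega
      have : (b - a - 1) / s = 0 := Int.ediv_eq_zero_of_lt (by omega) h1
      simp [h, this]
  rw [hcount]
  have hN : (if a < b then ((b - a + s - 1) / s).toNat else 0) = ((b - a - 1)/s).toNat + 1 := by
    simp [hab, hd]; omega
  rw [hN, List.range_succ_eq_map, List.map_cons, List.map_map]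
  simp only [Nat.cast_zero, mul_zero, add_zero]
  congr 1
  apply List.map_congr_left
  intro k _
  simp [Function.comp, Nat.succ_eq_add_one]
  ring

-- shifting both endpoints of a positive-step range shifts its elements
lemma pyRange_shift (a b d s : Int) (hs : 0 < s) :
    PySem.List.pyRange (a + d) (b + d) s = (PySem.List.pyRange a b s).map (· + d) := by
  rw [PySem.List.pyRange_of_pos _ _ hs, PySem.List.pyRange_of_pos _ _ hs, List.map_map]
  have : b + d - (a + d) = b - a := by ring
  rw [this]
  simp only [add_lt_add_iff_right]
  apply List.map_congr_left
  intro k _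
  simp [Function.comp]; ring

-- per-line agreement: A's while-loop equals B's chunk-index comprehension
lemma whileA_eq_chunks (fuel : Nat) (line : List Char) (m : Int) (out : List (List Char))
    (hm : 1 ≤ m) (hf : line.length ≤ fuel) :
    pvWhileA fuel line m out =
      out ++ (PySem.List.pyRange 0 (max (line.length : Int) 1) m).map (fun i =>
        PySem.List.slice line (some i) (some (i + m))) := by
  have hsingle : ∀ l : List Char, l.length ≤ m.toNat →
      (PySem.List.pyRange 0 (max (l.length : Int) 1) m).map (fun i =>
        PySem.List.slice l (some i) (some (i + m))) = [l] := by
    intro l hl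
    have hcons : PySem.List.pyRange 0 (max (l.length : Int) 1) m
        = 0 :: PySem.List.pyRange (0 + m) (max (l.length : Int) 1) m :=
      pyRange_pos_cons _ _ m (by omega) (by omega)
    have hnil : PySem.List.pyRange (0 + m) (max (l.length : Int) 1) m = [] :=
      pyRange_pos_nil _ _ m (by omega) (by omega)
    rw [hcons, hnil, List.map_cons, List.map_nil,
      PySem.List.slice_toNat l (le_refl 0) (by omega),
      show Int.toNat 0 = 0 from rfl, List.drop_zero, Nat.sub_zero,
      List.take_of_length_le (by omega)]
  induction fuel generalizing line out with
  | zero =>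
    have h0 : line = [] := by
      cases line with | nil => rfl | cons c t => simp at hf
    subst h0
    rw [pvWhileA, hsingle [] (by simp)]
  | succ f ih =>
    by_cases hlong : (line.length : Int) > m
    · rw [pvWhileA, if_pos hlong]
      have hlen' : (PySem.List.slice line (some m) none).length ≤ f := by
        rw [PySem.List.slice_from line (by omega)]
        simp; omega
      rw [ih _ _ hlen', List.append_assoc]
      congr 1
      have hmaxL : max (line.length : Int) 1 = (line.length : Int) := by omega
      rw [hmaxL, pyRange_pos_cons 0 (line.length : Int) m (by omega) (by omega),
        List.map_cons, List.singleton_append]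
      have hhead : PySem.List.slice line none (some m)
          = PySem.List.slice line (some 0) (some (0 + m)) := by
        rw [PySem.List.slice_toNat line (le_refl 0) (by omega), PySem.List.slice_to line (by omega)]
        simp
      rw [hhead]
      congr 1
      -- tail: shift the range by m and re-slice through the dropped prefix
      have hL' : (PySem.List.slice line (some m) none).length = line.length - m.toNat := by
        rw [PySem.List.slice_from line (by omega)]; simp
      have hmax' : max ((PySem.List.slice line (some m) none).length : Int) 1
          = (line.length : Int) - m := by
        rw [hL']; omega
      rw [hmax']
      have hshift : PySem.List.pyRange (0 + m) ((line.length : Int)) m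
          = (PySem.List.pyRange 0 ((line.length : Int) - m) m).map (· + m) := by
        have h := pyRange_shift 0 ((line.length : Int) - m) m m (by omega)
        rw [zero_add, sub_add_cancel] at h
        rw [show (0:Int) + m = m by ring, h]
      rw [hshift, List.map_map]
      apply List.map_congr_left
      intro i hi
      have hi0 : 0 ≤ i := ((PySem.List.mem_pyRange_iff_of_pos (by omega) i).mp hi).1
      simp only [Function.comp]
      rw [PySem.List.slice_from line (by omega),
        PySem.List.slice_toNat _ (by omega : (0:Int) ≤ i) (by omega : (0:Int) ≤ i + m),
        PySem.List.slice_toNat line (by omega : (0:Int) ≤ i + m) (by omega : (0:Int) ≤ i + m + m),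
        List.drop_drop]
      congr 1
      · omega
      · congr 1; omega
    · rw [pvWhileA, if_neg hlong, hsingle line (by omega)]

-- ===== VERDICT (by name: the statement is the Claim_ definition above) =====
theorem wrap_long_tokens_py_spec : Claim_equal_wrap_long_tokens_py := by
  intro text max_len _ hpre
  have hm : 1 ≤ max_len := hpre
  unfold Spec_wrap_long_tokens_py wrap_long_tokens_py wrap_long_tokens_py_alt
  have hstep : (fun (out : List (List Char)) line => pvWhileA line.length line max_len out)
      = fun (out : List (List Char)) line =>
          out ++ (PySem.List.pyRange 0 (max (line.length : Int) 1) max_len).map (fun i =>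
            PySem.List.slice line (some i) (some (i + max_len))) :=
    funext fun out => funext fun line => whileA_eq_chunks _ _ _ _ hm le_rfl
  rw [hstep, PySem.List.foldl_append_eq_flatMap, List.nil_append]
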